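-- pv_equiv track=rewrite | github.com/sayantan-2/CSE-DSA-LAB | assignment 9/python/programs/9.py | find_min_repeating_index
-- ===== SOURCE A (Python) =====
-- def find_min_repeating_index(arr):
--     element_indices = {}  # Dictionary to store the indices of elements
--     min_repeating_index = float("inf")
--
--     for index, element in enumerate(arr):
--         if element in element_indices:
--             min_repeating_index = min(min_repeating_index, element_indices[element])
--         else:
--             element_indices[element] = index
--
--     if min_repeating_index == float("inf"):
--         return -1  # No repeating element found
--     else:
--         return min_repeating_index
-- ===== SOURCE B (Python) =====
-- def find_min_repeating_index(arr):
--     # Pass 1: frequency table of the whole list.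
--     counts = {}
--     for x in arr:
--         counts[x] = counts.get(x, 0) + 1
--     # Pass 2: the first index whose element occurs at least twice is the
--     # smallest first-occurrence index of any repeated element.
--     i = 0
--     for x in arr:
--         if counts[x] >= 2:
--             return i
--         i += 1
--     return -1
-- ===== Notes on version B (the rewrite author's own statement) =====
-- stated objective: simpler
-- what changed: Replaced A's single pass with a first-seen index dict and a running minimum over float('inf') by two plain passes: build a frequency table, then return the first index whose element has count >= 2 (that index is necessarily the smallest first occurrence of a repeated element).
import Mathlib
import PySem

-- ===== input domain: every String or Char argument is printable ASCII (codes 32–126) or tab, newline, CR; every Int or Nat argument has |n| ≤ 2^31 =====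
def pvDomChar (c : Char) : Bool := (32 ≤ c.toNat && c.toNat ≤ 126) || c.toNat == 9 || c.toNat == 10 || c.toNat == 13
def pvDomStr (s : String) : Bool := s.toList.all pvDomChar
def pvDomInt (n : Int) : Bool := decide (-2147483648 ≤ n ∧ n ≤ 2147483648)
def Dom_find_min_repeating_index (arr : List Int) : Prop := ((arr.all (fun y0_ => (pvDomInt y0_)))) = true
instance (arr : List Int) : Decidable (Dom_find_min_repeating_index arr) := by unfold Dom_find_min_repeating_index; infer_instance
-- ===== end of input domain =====

-- B replaces A's single pass (first-seen-index dict + running minimum) by two plain passes: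
-- build a frequency table, then return the first index whose element has count >= 2.

-- ===== PORT A =====
-- Loop of A: state = (element_indices, min_repeating_index as Option Int: none = float('inf')),
-- i the running enumerate index; 'if element in element_indices' + lookup ported as one match on get?.
def aLoop : PySem.Dict Int Int → Option Int → Int → List Int → Option Int
  | _, m, _, [] => m
  | d, m, i, x :: rest =>
    match d.get? x with
    | some j => aLoop d (some (match m with | none => j | some k => min k j)) (i + 1) rest
    | none => aLoop (d.insert x i) m (i + 1) rest

def find_min_repeating_index (arr : List Int) : Int :=
  match aLoop PySem.Dict.empty none 0 arr with
  | none => -1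
  | some k => k

-- ===== PORT B =====
-- Pass 2 of B: first index whose element's count is >= 2, else -1.
def bFind : PySem.Dict Int Int → Int → List Int → Int
  | _, _, [] => -1
  | c, i, x :: rest => if 2 ≤ c.getD x 0 then i else bFind c (i + 1) rest

def find_min_repeating_index_alt (arr : List Int) : Int :=
  -- Pass 1: counts[x] = counts.get(x, 0) + 1
  let counts := arr.foldl (fun (d : PySem.Dict Int Int) x => d.insert x (d.getD x 0 + 1)) PySem.Dict.empty
  bFind counts 0 arr

-- ===== PRECONDITION & SPEC =====
def Spec_find_min_repeating_index (arr : List Int) (out : Int) : Prop := out = find_min_repeating_index_alt arr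
instance (arr : List Int) (out : Int) : Decidable (Spec_find_min_repeating_index arr out) := by unfold Spec_find_min_repeating_index; infer_instance

-- ===== CLAIM (what is proved, stated in full; the proofs are below) =====
def Claim_equal_find_min_repeating_index : Prop := ∀ (arr : List Int), Dom_find_min_repeating_index arr → Spec_find_min_repeating_index arr (find_min_repeating_index arr)

-- ===== LEMMAS AND PROOFS =====

-- Python's min with float('inf') as none.
def omin : Option Int → Option Int → Option Int
  | none, b => b
  | some k, none => some k
  | some k, some j => some (min k j)

-- Abstract form of A's loop: the running minimum of first-occurrence indices of repeats.
def hm : List Int → List Int → Option Int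
  | _, [] => none
  | pre, x :: s =>
    match PySem.List.index? pre x with
    | some n => omin (some (n : Int)) (hm (pre ++ [x]) s)
    | none => hm (pre ++ [x]) s

-- "index i of arr holds a repeated element"
def dup (arr : List Int) (i : Nat) : Prop := i < arr.length ∧ 2 ≤ arr.count (arr.getD i 0)

-- "r is the least index with a repeated element at/after k, or -1 if none"
def LeastDupR (arr : List Int) (k : Nat) (r : Int) : Prop :=
  if r = -1 then ∀ i, k ≤ i → ¬ dup arr i
  else ∃ m : Nat, r = (m : Int) ∧ k ≤ m ∧ dup arr m ∧ ∀ j, k ≤ j → j < m → ¬ dup arr j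

theorem leastDupR_unique (arr : List Int) (k : Nat) (r₁ r₂ : Int)
    (h₁ : LeastDupR arr k r₁) (h₂ : LeastDupR arr k r₂) : r₁ = r₂ := by
  unfold LeastDupR at h₁ h₂
  by_cases e1 : r₁ = -1 <;> by_cases e2 : r₂ = -1
  · rw [e1, e2]
  · rw [if_pos e1] at h₁; rw [if_neg e2] at h₂
    obtain ⟨m, hm, hk, hd, _⟩ := h₂; exact absurd hd (h₁ m hk)
  · rw [if_neg e1] at h₁; rw [if_pos e2] at h₂
    obtain ⟨m, hm, hk, hd, _⟩ := h₁; exact absurd hd (h₂ m hk)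
  · rw [if_neg e1] at h₁; rw [if_neg e2] at h₂
    obtain ⟨m₁, e₁, k₁, d₁, min₁⟩ := h₁
    obtain ⟨m₂, e₂, k₂, d₂, min₂⟩ := h₂
    have : m₁ = m₂ := by
      rcases Nat.lt_trichotomy m₁ m₂ with h | h | h
      · exact absurd d₁ (min₂ m₁ k₁ h)
      · exact h
      · exact absurd d₂ (min₁ m₂ k₂ h)
    omega

-- getD of a list at the length of a prefix
theorem getD_append_length (pre : List Int) (x : Int) (s : List Int) :
    (pre ++ x :: s).getD pre.length 0 = x := by
  simp [List.getD]

-- two positions with the same value give count ≥ 2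
theorem two_idx_le_count : ∀ (l : List Int) (p q : Nat), p < q → q < l.length →
    l.getD p 0 = l.getD q 0 → 2 ≤ l.count (l.getD p 0) := by
  intro l
  induction l with
  | nil => intro p q _ hq _; simp at hq
  | cons x t ih =>
    intro p q hpq hq heq
    cases p with
    | zero =>
      cases q with
      | zero => omega
      | succ q' =>
        simp only [List.getD_cons_zero, List.getD_cons_succ] at heq ⊢
        have hq' : q' < t.length := by simpa using hq
        have hx : x ∈ t := by
          have : t.getD q' 0 = t[q']'hq' := List.getD_eq_getElem t 0 hq'
          rw [heq, this]
          exact List.getElem_mem hq'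
        have : 1 ≤ t.count x := List.count_pos_iff.mpr hx
        simp [List.count_cons]
        omega
    | succ p' =>
      cases q with
      | zero => omega
      | succ q' =>
        simp only [List.getD_cons_succ] at heq ⊢
        have h2 := ih p' q' (by omega) (by simpa using hq) heq
        exact le_trans h2 ((List.sublist_cons_self x t).count_le _)

theorem two_le_count_exists : ∀ (l : List Int) (y : Int), 2 ≤ l.count y →
    ∃ j, j < l.length ∧ l.getD j 0 = y ∧ y ∈ l.take j := by
  intro l
  induction l with
  | nil => intro y h; simp at h
  | cons x t ih =>
    intro y h
    by_cases hxy : y = x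
    · subst hxy
      rw [List.count_cons_self] at h
      have hy : y ∈ t := List.count_pos_iff.mp (by omega)
      obtain ⟨p, hp, hpe⟩ := List.mem_iff_getElem.mp hy
      refine ⟨p + 1, by simpa using hp, ?_, ?_⟩
      · simp only [List.getD_cons_succ]
        rw [List.getD_eq_getElem t 0 hp, hpe]
      · simp [List.take_succ_cons]
    · have h2 : 2 ≤ t.count y := by simp [List.count_cons, Ne.symm hxy] at h; omega
      obtain ⟨j, hj, hje, hjm⟩ := ih y h2
      exact ⟨j + 1, by simpa using hj, by simpa using hje, by simp [List.take_succ_cons]; right; exact hjm⟩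

theorem index?_le_of_getD (l : List Int) (j : Nat) (hj : j < l.length) :
    ∃ nz, nz ≤ j ∧ PySem.List.index? l (l.getD j 0) = some nz := by
  have hmem : l.getD j 0 ∈ l := by
    rw [List.getD_eq_getElem l 0 hj]; exact List.getElem_mem hj
  have hsome : (PySem.List.index? l (l.getD j 0)).isSome := (PySem.List.index?_isSome_iff l _).mpr hmem
  obtain ⟨nz, hnz⟩ := Option.isSome_iff_exists.mp hsome
  obtain ⟨hlt, _, hfirst⟩ := PySem.List.getElem_of_index?_eq_some hnz
  refine ⟨nz, ?_, hnz⟩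
  by_contra hgt
  push_neg at hgt
  exact hfirst j hgt (by rw [← List.getD_eq_getElem l 0 hj])

-- ===== A-side: aLoop = hm =====
theorem aLoop_eq_hm : ∀ (suf pre : List Int) (d : PySem.Dict Int Int) (m : Option Int),
    (∀ x, d.get? x = (PySem.List.index? pre x).map (fun n => (n : Int))) →
    aLoop d m (pre.length : Int) suf = omin m (hm pre suf) := by
  intro suf
  induction suf with
  | nil => intro pre d m _; cases m <;> simp [aLoop, hm, omin]
  | cons x s ih =>
    intro pre d m hd
    have hlen : ((pre.length : Int) + 1) = (((pre ++ [x]).length : Nat) : Int) := by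
      simp
    cases hix : PySem.List.index? pre x with
    | none =>
      have hget : d.get? x = none := by rw [hd, hix]; rfl
      have hxnot : x ∉ pre := (PySem.List.index?_eq_none_iff pre x).mp hix
      have hd' : ∀ y, (d.insert x (pre.length : Int)).get? y
          = (PySem.List.index? (pre ++ [x]) y).map (fun n => (n : Int)) := by
        intro y
        by_cases hy : y = x
        · subst hy
          rw [PySem.Dict.get?_insert_self,
            PySem.List.index?_append_singleton_self pre _ hxnot]
          rfl
        · rw [PySem.Dict.get?_insert_of_ne d _ hy, hd]
          by_cases hmem : y ∈ pre
          · rw [PySem.List.index?_append_of_mem [x] hmem]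
          · rw [(PySem.List.index?_eq_none_iff pre y).mpr hmem,
              (PySem.List.index?_eq_none_iff (pre ++ [x]) y).mpr (by
                simp [hmem, hy])]
      have := ih (pre ++ [x]) (d.insert x (pre.length : Int)) m hd'
      simp only [aLoop, hget]
      rw [hlen, this]
      simp only [hm, hix]
    | some n =>
      have hget : d.get? x = some (n : Int) := by rw [hd, hix]; rfl
      have hxmem : x ∈ pre := by
        have : (PySem.List.index? pre x).isSome := by rw [hix]; rfl
        exact (PySem.List.index?_isSome_iff pre x).mp this
      have hd' : ∀ y, d.get? y
          = (PySem.List.index? (pre ++ [x]) y).map (fun n => (n : Int)) := by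
        intro y
        rw [hd]
        by_cases hmem : y ∈ pre
        · rw [PySem.List.index?_append_of_mem [x] hmem]
        · have hy : y ≠ x := fun he => hmem (he ▸ hxmem)
          rw [(PySem.List.index?_eq_none_iff pre y).mpr hmem,
            (PySem.List.index?_eq_none_iff (pre ++ [x]) y).mpr (by simp [hmem, hy])]
      have := ih (pre ++ [x]) d (some (match m with | none => (n : Int) | some k => min k (n : Int))) hd'
      simp only [aLoop, hget]
      rw [hlen, this]
      simp only [hm, hix]
      cases m <;> cases hhm : hm (pre ++ [x]) s <;> simp [omin, min_assoc]

-- ===== characterisation of hm =====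
def Seen (arr : List Int) (i : Nat) : Prop := arr.getD i 0 ∈ arr.take i

def HMspec (arr : List Int) (k : Nat) (o : Option Int) : Prop :=
  match o with
  | none => ∀ i, k ≤ i → i < arr.length → ¬ Seen arr i
  | some v => ∃ m : Nat, v = (m : Int) ∧
      (∃ i, k ≤ i ∧ i < arr.length ∧ Seen arr i ∧ PySem.List.index? arr (arr.getD i 0) = some m) ∧
      (∀ i n, k ≤ i → i < arr.length → Seen arr i → PySem.List.index? arr (arr.getD i 0) = some n → m ≤ n)

theorem hm_spec (arr : List Int) : ∀ (suf pre : List Int), arr = pre ++ suf →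
    HMspec arr pre.length (hm pre suf) := by
  intro suf
  induction suf with
  | nil =>
    intro pre harr
    simp only [hm, HMspec]
    intro i hki hil
    rw [harr] at hil
    simp at hil
    omega
  | cons x s ih =>
    intro pre harr
    have harr' : arr = (pre ++ [x]) ++ s := by rw [harr]; simp
    have hlen' : (pre ++ [x]).length = pre.length + 1 := by simp
    have hgetD : arr.getD pre.length 0 = x := by rw [harr]; exact getD_append_length pre x s
    have htake : arr.take pre.length = pre := by
      rw [harr]; exact List.take_left
    have hlength : pre.length < arr.length := by rw [harr]; simp
    have hseen_iff : Seen arr pre.length ↔ x ∈ pre := by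
      unfold Seen; rw [hgetD, htake]
    have IH := ih (pre ++ [x]) harr'
    rw [hlen'] at IH
    cases hix : PySem.List.index? pre x with
    | some n =>
      have hxmem : x ∈ pre := by
        have : (PySem.List.index? pre x).isSome := by rw [hix]; rfl
        exact (PySem.List.index?_isSome_iff pre x).mp this
      have hidx : PySem.List.index? arr x = some n := by
        rw [harr, PySem.List.index?_append_of_mem (x :: s) hxmem, hix]
      simp only [hm, hix]
      cases hh : hm (pre ++ [x]) s with
      | none =>
        rw [hh] at IH
        simp only [HMspec] at IH ⊢
        refine ⟨n, by simp [omin], ⟨pre.length, le_refl _, hlength, hseen_iff.mpr hxmem, by rw [hgetD]; exact hidx⟩, ?_⟩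
        intro i n' hki hil hsi hidx'
        rcases Nat.eq_or_lt_of_le hki with he | hlt
        · rw [← he] at hidx'
          rw [hgetD, hidx] at hidx'
          simp at hidx'
          omega
        · exact absurd hsi (IH i hlt hil)
      | some w =>
        rw [hh] at IH
        simp only [HMspec] at IH ⊢
        obtain ⟨m', hwm, ⟨i', hki', hil', hsi', hidx'⟩, hmin'⟩ := IH
        refine ⟨min n m', by rw [hwm]; simp [omin, Nat.cast_min], ?_, ?_⟩
        · by_cases hnm : n ≤ m'
          · exact ⟨pre.length, le_refl _, hlength, hseen_iff.mpr hxmem,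
              by rw [hgetD, hidx]; congr 1; omega⟩
          · exact ⟨i', by omega, hil', hsi', by rw [hidx']; congr 1; omega⟩
        · intro i n'' hki hil hsi hidx''
          rcases Nat.eq_or_lt_of_le hki with he | hlt
          · rw [← he] at hidx''
            rw [hgetD, hidx] at hidx''
            simp at hidx''
            omega
          · have := hmin' i n'' hlt hil hsi hidx''
            omega
    | none =>
      have hxnot : x ∉ pre := (PySem.List.index?_eq_none_iff pre x).mp hix
      have hnseen : ¬ Seen arr pre.length := fun h => hxnot (hseen_iff.mp h)
      simp only [hm, hix]
      cases hh : hm (pre ++ [x]) s with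
      | none =>
        rw [hh] at IH
        simp only [HMspec] at IH ⊢
        intro i hki hil
        rcases Nat.eq_or_lt_of_le hki with he | hlt
        · rw [← he]; exact hnseen
        · exact IH i hlt hil
      | some w =>
        rw [hh] at IH
        simp only [HMspec] at IH ⊢
        obtain ⟨m', hwm, ⟨i', hki', hil', hsi', hidx'⟩, hmin'⟩ := IH
        refine ⟨m', hwm, ⟨i', by omega, hil', hsi', hidx'⟩, ?_⟩
        intro i n'' hki hil hsi hidx''
        rcases Nat.eq_or_lt_of_le hki with he | hlt
        · rw [← he] at hsi; exact absurd hsi hnseen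
        · exact hmin' i n'' hlt hil hsi hidx''

-- HMspec at 0 pins down A's final answer as the least dup index
theorem hmspec_none (arr : List Int) (h : HMspec arr 0 none) : LeastDupR arr 0 (-1) := by
  simp only [HMspec] at h
  unfold LeastDupR
  rw [if_pos rfl]
  intro i _ hd
  obtain ⟨hil, hc⟩ := hd
  obtain ⟨j, hj, hje, hjm⟩ := two_le_count_exists arr _ hc
  exact h j (Nat.zero_le j) hj (by unfold Seen; rw [hje]; exact hjm)

theorem hmspec_some (arr : List Int) (v : Int) (h : HMspec arr 0 (some v)) : LeastDupR arr 0 v := by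
  simp only [HMspec] at h
  obtain ⟨m, hv, ⟨i, _, hil, hsi, hidx⟩, hmin⟩ := h
  unfold LeastDupR
  rw [if_neg (by omega)]
  obtain ⟨hmlt, hme, hfirst⟩ := PySem.List.getElem_of_index?_eq_some hidx
  have hgdm : arr.getD m 0 = arr.getD i 0 := by
    rw [List.getD_eq_getElem arr 0 hmlt, hme]
  have hdupm : dup arr m := by
    refine ⟨hmlt, ?_⟩
    -- find an occurrence of arr.getD i 0 strictly after m
    unfold Seen at hsi
    obtain ⟨p, hp, hpe⟩ := List.mem_iff_getElem.mp hsi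
    have hpl : p < arr.length := by
      have := hp; simp [List.length_take] at this; omega
    have hpi : p < i := by
      have := hp; simp [List.length_take] at this; omega
    have hpe' : arr[p]'hpl = arr.getD i 0 := by
      rw [← hpe]; exact (List.getElem_take).symm
    have hmp : m ≤ p := by
      by_contra hc
      push_neg at hc
      exact hfirst p hc hpe'
    have hmi : m < i := lt_of_le_of_lt hmp hpi
    have := two_idx_le_count arr m i hmi hil (by
      rw [hgdm, List.getD_eq_getElem arr 0 hil])
    exact this
  refine ⟨m, hv, Nat.zero_le m, hdupm, ?_⟩
  intro j _ hjm hdj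
  obtain ⟨hjl, hcj⟩ := hdj
  obtain ⟨nz, hnzj, hnz⟩ := index?_le_of_getD arr j hjl
  obtain ⟨j₂, hj₂l, hj₂e, hj₂m⟩ := two_le_count_exists arr _ hcj
  have hseen₂ : Seen arr j₂ := by unfold Seen; rw [hj₂e]; exact hj₂m
  have := hmin j₂ nz (Nat.zero_le j₂) hj₂l hseen₂ (by rw [hj₂e]; exact hnz)
  omega

theorem bFind_least (arr : List Int) : ∀ (suf pre : List Int) (c : PySem.Dict Int Int),
    arr = pre ++ suf → (∀ x, c.getD x 0 = (arr.count x : Int)) →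
    LeastDupR arr pre.length (bFind c (pre.length : Int) suf) := by
  intro suf
  induction suf with
  | nil =>
    intro pre c harr _
    simp only [bFind, LeastDupR, if_pos rfl]
    intro i hi hd
    have := hd.1
    rw [harr] at this
    simp at this
    omega
  | cons x s ih =>
    intro pre c harr hc
    have hx : arr.getD pre.length 0 = x := by rw [harr]; exact getD_append_length pre x s
    by_cases h2 : 2 ≤ c.getD x 0
    · have hcount : 2 ≤ arr.count x := by
        have := hc x; rw [this] at h2; exact_mod_cast h2
      have hres : bFind c (pre.length : Int) (x :: s) = (pre.length : Int) := by
        simp [bFind, h2]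
      rw [hres]
      unfold LeastDupR
      rw [if_neg (by omega)]
      exact ⟨pre.length, rfl, le_refl _,
          ⟨by rw [harr]; simp, by rw [hx]; exact hcount⟩,
          fun j hj hjlt _ => absurd hjlt (by omega)⟩
    · have hcount : ¬ 2 ≤ arr.count x := by
        intro hh
        exact h2 (by rw [hc x]; exact_mod_cast hh)
      have hndup : ¬ dup arr pre.length := by
        intro hd
        have := hd.2
        rw [hx] at this
        exact hcount this
      have hres : bFind c (pre.length : Int) (x :: s) = bFind c (((pre ++ [x]).length : Nat) : Int) s := by
        simp [bFind, h2]
      rw [hres]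
      have := ih (pre ++ [x]) c (by rw [harr]; simp) hc
      unfold LeastDupR at this ⊢
      by_cases hr : bFind c (((pre ++ [x]).length : Nat) : Int) s = -1
      · rw [if_pos hr] at this
        rw [if_pos hr]
        intro i hi
        rcases Nat.eq_or_lt_of_le hi with he | hlt
        · rw [← he]; exact hndup
        · exact this i (by simp; omega)
      · rw [if_neg hr] at this
        rw [if_neg hr]
        obtain ⟨m, hme, hkm, hdm, hmin⟩ := this
        refine ⟨m, hme, by simp at hkm; omega, hdm, ?_⟩
        intro j hj hjm
        rcases Nat.eq_or_lt_of_le hj with he | hlt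
        · rw [← he]; exact hndup
        · exact hmin j (by simp; omega) hjm

-- ===== VERDICT (by name: the statement is the Claim_ definition above) =====
theorem find_min_repeating_index_spec : Claim_equal_find_min_repeating_index := by
  intro arr _
  unfold Spec_find_min_repeating_index
  have hA : LeastDupR arr 0 (find_min_repeating_index arr) := by
    unfold find_min_repeating_index
    have h0 : aLoop PySem.Dict.empty none 0 arr = omin none (hm [] arr) := by
      have := aLoop_eq_hm arr [] PySem.Dict.empty none (by
        intro x
        simp [PySem.Dict.get?_empty, PySem.List.index?_eq_idxOf?])
      simpa using this
    rw [h0]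
    have hsp : HMspec arr 0 (hm [] arr) := by
      have := hm_spec arr arr [] (by simp)
      simpa using this
    cases hv : hm [] arr with
    | none => rw [hv] at hsp; simpa [omin] using hmspec_none arr hsp
    | some v => rw [hv] at hsp; simpa [omin] using hmspec_some arr v hsp
  have hB : LeastDupR arr 0 (find_min_repeating_index_alt arr) := by
    unfold find_min_repeating_index_alt
    have hc : ∀ x, ((arr.foldl (fun (d : PySem.Dict Int Int) x => d.insert x (d.getD x 0 + 1)) PySem.Dict.empty).getD x 0) = (arr.count x : Int) := by
      intro x
      rw [PySem.Dict.foldl_insert_getD_add_one_eq_counter, PySem.Dict.getD_counter]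
    have := bFind_least arr arr [] _ (by simp) hc
    simpa using this
  exact leastDupR_unique arr 0 _ _ hA hB
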